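-- pv_equiv track=rewrite | github.com/Satniuq/DoReal | 00_historico/09_Prompt/extrator_robusto.py | expandir_ids
-- ===== SOURCE A (Python) =====
-- def expandir_ids(ids_candidatos, grafo):
--     permitidos = set(ids_candidatos)
--     for _ in range(2):
--         novos = {
--             dep
--             for i in list(permitidos)
--             if i in grafo
--             for dep in grafo[i].get("depende_de", [])
--             if dep in grafo
--         }
--         permitidos |= novos
--     return sorted(permitidos)
-- ===== SOURCE B (Python) =====
-- def expandir_ids(ids_candidatos, grafo):
--     # Closed-form two-hop expansion scanning the graph's entries instead of
--     # looping over the growing permitted set (alternative decomposition).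
--     base = set(ids_candidatos)
--     h1 = {d for i, info in grafo.items() if i in base
--             for d in info.get("depende_de", []) if d in grafo}
--     h2 = {d for i, info in grafo.items() if i in h1
--             for d in info.get("depende_de", []) if d in grafo}
--     return sorted(base | h1 | h2)
-- ===== Notes on version B (the rewrite author's own statement) =====
-- stated objective: alternative
-- what changed: Replaces the two-round loop that rescans the whole growing permitted set with a closed-form two-hop expansion (base, hop1, hop2) computed by scanning the graph's entries and filtering them against the current set, then sorting the union.
import Mathlib
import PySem

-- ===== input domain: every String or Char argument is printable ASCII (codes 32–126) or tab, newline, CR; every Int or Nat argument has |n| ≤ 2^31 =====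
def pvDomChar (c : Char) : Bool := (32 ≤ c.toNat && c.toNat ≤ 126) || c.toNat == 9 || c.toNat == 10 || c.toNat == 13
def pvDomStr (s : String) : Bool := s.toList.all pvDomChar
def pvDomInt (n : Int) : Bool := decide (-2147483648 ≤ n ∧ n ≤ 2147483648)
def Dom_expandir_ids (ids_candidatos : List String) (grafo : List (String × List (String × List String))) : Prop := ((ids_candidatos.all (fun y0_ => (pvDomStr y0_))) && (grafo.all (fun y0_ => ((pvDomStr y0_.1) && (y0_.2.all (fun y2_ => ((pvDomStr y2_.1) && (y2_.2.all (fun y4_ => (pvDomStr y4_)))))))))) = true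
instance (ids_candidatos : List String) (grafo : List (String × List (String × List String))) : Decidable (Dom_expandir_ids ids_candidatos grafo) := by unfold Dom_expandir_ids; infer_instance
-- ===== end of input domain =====

-- B replaces the two rescans of the growing set by a closed-form two-hop expansion
-- that scans the graph's entries; objective: alternative decomposition.

-- ===== PORT A =====
def expandir_ids (ids_candidatos : List String) (grafo : List (String × List (String × List String))) : List String :=
  let g := PySem.Dict.mk grafo
  let permitidos := PySem.Set.ofList ids_candidatos
  let permitidos := (PySem.List.pyRange 0 2 1).foldl (fun permitidos _ =>
    let novos := permitidos.foldl (fun novos i =>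
      if g.contains i then
        ((PySem.Dict.mk (g.getD i [])).getD "depende_de" []).foldl
          (fun novos dep => if g.contains dep then PySem.Set.add novos dep else novos) novos
      else novos) PySem.Set.empty
    PySem.Set.union permitidos novos) permitidos
  PySem.List.sorted permitidos (fun x => x)

-- ===== PORT B =====
def expandir_ids_alt (ids_candidatos : List String) (grafo : List (String × List (String × List String))) : List String :=
  let g := PySem.Dict.mk grafo
  let base := PySem.Set.ofList ids_candidatos
  let h1 := g.items.foldl (fun s p =>
    if PySem.Set.contains base p.1 then
      ((PySem.Dict.mk p.2).getD "depende_de" []).foldl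
        (fun s d => if g.contains d then PySem.Set.add s d else s) s
    else s) PySem.Set.empty
  let h2 := g.items.foldl (fun s p =>
    if PySem.Set.contains h1 p.1 then
      ((PySem.Dict.mk p.2).getD "depende_de" []).foldl
        (fun s d => if g.contains d then PySem.Set.add s d else s) s
    else s) PySem.Set.empty
  PySem.List.sorted (PySem.Set.union (PySem.Set.union base h1) h2) (fun x => x)

-- ===== PRECONDITION & SPEC =====
-- Pre_ requires the outer association list (the Python dict 'grafo') to have unique keys:
-- a duplicate-key list corresponds to no Python dict argument, so nothing A returns on is excluded.
def Pre_expandir_ids (ids_candidatos : List String) (grafo : List (String × List (String × List String))) : Prop :=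
  (grafo.map Prod.fst).Nodup
instance (ids_candidatos : List String) (grafo : List (String × List (String × List String))) : Decidable (Pre_expandir_ids ids_candidatos grafo) := by unfold Pre_expandir_ids; infer_instance

def pvWitness_expandir_ids : List String × (List (String × List (String × List String))) :=
  (["a"], [("a", [("depende_de", ["b", "c"])]), ("b", [])])

def Spec_expandir_ids (ids_candidatos : List String) (grafo : List (String × List (String × List String))) (out : List String) : Prop := out = expandir_ids_alt ids_candidatos grafo
instance (ids_candidatos : List String) (grafo : List (String × List (String × List String))) (out : List String) : Decidable (Spec_expandir_ids ids_candidatos grafo out) := by unfold Spec_expandir_ids; infer_instance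

-- ===== CLAIM (what is proved, stated in full; the proofs are below) =====
def Claim_equal_expandir_ids : Prop := ∀ (ids_candidatos : List String) (grafo : List (String × List (String × List String))), Dom_expandir_ids ids_candidatos grafo → Pre_expandir_ids ids_candidatos grafo → Spec_expandir_ids ids_candidatos grafo (expandir_ids ids_candidatos grafo)

-- ===== LEMMAS AND PROOFS =====

-- membership in a "if cond then add" fold (the inner dep-collecting loop of both ports)
theorem pv_mem_condAdd (c : String → Bool) (l : List String) (s0 : PySem.Set String) (x : String) :
    x ∈ l.foldl (fun s d => if c d then PySem.Set.add s d else s) s0 ↔ x ∈ s0 ∨ (x ∈ l ∧ c x = true) := by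
  induction l generalizing s0 with
  | nil => simp
  | cons a t ih =>
    simp only [List.foldl_cons, ih]
    by_cases h : c a = true
    · simp only [h, if_pos, PySem.Set.mem_add, List.mem_cons]
      constructor
      · rintro ((hs | rfl) | ht) <;> tauto
      · rintro (hs | ⟨(rfl | hx), hc⟩) <;> tauto
    · simp only [h, if_neg, List.mem_cons, Bool.false_eq_true]
      constructor
      · rintro (hs | ht) <;> tauto
      · rintro (hs | ⟨(rfl | hx), hc⟩) <;> tauto

theorem pv_mem_hopA (g : PySem.Dict String (List (String × List String))) (l : List String)
    (s0 : PySem.Set String) (x : String) :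
    x ∈ l.foldl (fun s i =>
      if g.contains i then
        ((PySem.Dict.mk (g.getD i [])).getD "depende_de" []).foldl
          (fun s d => if g.contains d then PySem.Set.add s d else s) s
      else s) s0
    ↔ x ∈ s0 ∨ ∃ i ∈ l, g.contains i = true ∧
        x ∈ (PySem.Dict.mk (g.getD i [])).getD "depende_de" [] ∧ g.contains x = true := by
  induction l generalizing s0 with
  | nil => simp
  | cons a t ih =>
    simp only [List.foldl_cons, ih]
    by_cases h : g.contains a = true
    · simp only [h, if_pos, pv_mem_condAdd, List.mem_cons]
      constructor
      · rintro ((hs | ⟨hm, hc⟩) | ⟨i, hi, hig, him, hic⟩)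
        · tauto
        · exact Or.inr ⟨a, Or.inl rfl, h, hm, hc⟩
        · exact Or.inr ⟨i, Or.inr hi, hig, him, hic⟩
      · rintro (hs | ⟨i, (rfl | hi), hig, him, hic⟩)
        · tauto
        · exact Or.inl (Or.inr ⟨him, hic⟩)
        · exact Or.inr ⟨i, hi, hig, him, hic⟩
    · simp only [h, if_neg, List.mem_cons, Bool.false_eq_true]
      constructor
      · rintro (hs | ⟨i, hi, hig, him, hic⟩)
        · tauto
        · exact Or.inr ⟨i, Or.inr hi, hig, him, hic⟩
      · rintro (hs | ⟨i, (rfl | hi), hig, him, hic⟩)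
        · tauto
        · exact absurd hig h
        · exact Or.inr ⟨i, hi, hig, him, hic⟩

theorem pv_mem_hopB (g : PySem.Dict String (List (String × List String)))
    (m : PySem.Set String) (l : List (String × List (String × List String)))
    (s0 : PySem.Set String) (x : String) :
    x ∈ l.foldl (fun s p =>
      if PySem.Set.contains m p.1 then
        ((PySem.Dict.mk p.2).getD "depende_de" []).foldl
          (fun s d => if g.contains d then PySem.Set.add s d else s) s
      else s) s0
    ↔ x ∈ s0 ∨ ∃ p ∈ l, p.1 ∈ m ∧
        x ∈ (PySem.Dict.mk p.2).getD "depende_de" [] ∧ g.contains x = true := by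
  induction l generalizing s0 with
  | nil => simp
  | cons a t ih =>
    simp only [List.foldl_cons, ih]
    by_cases h : a.1 ∈ m
    · rw [if_pos (by simpa [PySem.Set.contains_iff] using h)]
      simp only [pv_mem_condAdd, List.mem_cons]
      constructor
      · rintro ((hs | ⟨hm, hc⟩) | ⟨p, hp, hpm, him, hic⟩)
        · tauto
        · exact Or.inr ⟨a, Or.inl rfl, h, hm, hc⟩
        · exact Or.inr ⟨p, Or.inr hp, hpm, him, hic⟩
      · rintro (hs | ⟨p, (rfl | hp), hpm, him, hic⟩)
        · tauto
        · exact Or.inl (Or.inr ⟨him, hic⟩)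
        · exact Or.inr ⟨p, hp, hpm, him, hic⟩
    · rw [if_neg (by simpa [PySem.Set.contains_iff] using h)]
      simp only [List.mem_cons]
      constructor
      · rintro (hs | ⟨p, hp, hpm, him, hic⟩)
        · tauto
        · exact Or.inr ⟨p, Or.inr hp, hpm, him, hic⟩
      · rintro (hs | ⟨p, (rfl | hp), hpm, him, hic⟩)
        · tauto
        · exact absurd hpm h
        · exact Or.inr ⟨p, hp, hpm, him, hic⟩

theorem pv_contains_mk (l : List (String × List (String × List String))) (k : String) :
    (PySem.Dict.mk l).contains k = true ↔ ∃ p ∈ l, p.1 = k := by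
  induction l with
  | nil => simp [PySem.Dict.contains, PySem.Dict.get?]
  | cons a t ih =>
    by_cases h : a.1 = k
    · simp [PySem.Dict.contains, PySem.Dict.get?, h]
    · simpa [PySem.Dict.contains, h] using ih

theorem pv_getD_mk_of_mem (l : List (String × List (String × List String)))
    (hn : (l.map Prod.fst).Nodup) (p : String × List (String × List String)) (hp : p ∈ l) :
    (PySem.Dict.mk l).getD p.1 [] = p.2 := by
  induction l with
  | nil => simp at hp
  | cons a t ih =>
    simp only [List.map_cons, List.nodup_cons] at hn
    rcases List.mem_cons.mp hp with rfl | hp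
    · simp [PySem.Dict.getD, PySem.Dict.get?]
    · have hne : a.1 ≠ p.1 := by
        intro h
        exact hn.1 (h ▸ (List.mem_map.mpr ⟨p, hp, rfl⟩))
      simp only [PySem.Dict.getD, PySem.Dict.get?] at ih ⊢
      simp [hne, ih hn.2 hp]

theorem pv_bridge (grafo : List (String × List (String × List String)))
    (hn : (grafo.map Prod.fst).Nodup) (S : List String) (x : String) :
    (∃ p ∈ grafo, p.1 ∈ S ∧ x ∈ (PySem.Dict.mk p.2).getD "depende_de" [] ∧
        (PySem.Dict.mk grafo).contains x = true)
    ↔ (∃ i ∈ S, (PySem.Dict.mk grafo).contains i = true ∧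
        x ∈ (PySem.Dict.mk (PySem.Dict.mk grafo |>.getD i [])).getD "depende_de" [] ∧
        (PySem.Dict.mk grafo).contains x = true) := by
  constructor
  · rintro ⟨p, hp, hpS, hmem, hx⟩
    refine ⟨p.1, hpS, (pv_contains_mk grafo p.1).mpr ⟨p, hp, rfl⟩, ?_, hx⟩
    rwa [pv_getD_mk_of_mem grafo hn p hp]
  · rintro ⟨i, hiS, hig, hmem, hx⟩
    obtain ⟨p, hp, rfl⟩ := (pv_contains_mk grafo i).mp hig
    refine ⟨p, hp, hiS, ?_, hx⟩
    rwa [pv_getD_mk_of_mem grafo hn p hp] at hmem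

-- proof-side names for the two loop shapes (definitionally equal to the ports' let-bodies)
def pvStep (grafo : List (String × List (String × List String))) (S : PySem.Set String) : PySem.Set String :=
  PySem.Set.union S (S.foldl (fun novos i =>
    if (PySem.Dict.mk grafo).contains i then
      ((PySem.Dict.mk ((PySem.Dict.mk grafo).getD i [])).getD "depende_de" []).foldl
        (fun novos dep => if (PySem.Dict.mk grafo).contains dep then PySem.Set.add novos dep else novos) novos
    else novos) PySem.Set.empty)

def pvHopB (grafo : List (String × List (String × List String))) (m : PySem.Set String) : PySem.Set String :=
  grafo.foldl (fun s p =>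
    if PySem.Set.contains m p.1 then
      ((PySem.Dict.mk p.2).getD "depende_de" []).foldl
        (fun s d => if (PySem.Dict.mk grafo).contains d then PySem.Set.add s d else s) s
    else s) PySem.Set.empty

theorem pv_mem_pvStep (grafo : List (String × List (String × List String))) (S : PySem.Set String) (x : String) :
    x ∈ pvStep grafo S ↔ x ∈ S ∨ ∃ i ∈ S, (PySem.Dict.mk grafo).contains i = true ∧
      x ∈ (PySem.Dict.mk ((PySem.Dict.mk grafo).getD i [])).getD "depende_de" [] ∧
      (PySem.Dict.mk grafo).contains x = true := by
  unfold pvStep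
  rw [PySem.Set.mem_union, pv_mem_hopA]
  simp

theorem pv_nodup_pvStep (grafo : List (String × List (String × List String))) (S : PySem.Set String)
    (h : S.Nodup) : (pvStep grafo S).Nodup :=
  PySem.Set.nodup_union _ _ h

theorem pv_mem_pvHopB (grafo : List (String × List (String × List String)))
    (hn : (grafo.map Prod.fst).Nodup) (m : PySem.Set String) (x : String) :
    x ∈ pvHopB grafo m ↔ ∃ i ∈ m, (PySem.Dict.mk grafo).contains i = true ∧
      x ∈ (PySem.Dict.mk ((PySem.Dict.mk grafo).getD i [])).getD "depende_de" [] ∧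
      (PySem.Dict.mk grafo).contains x = true := by
  unfold pvHopB
  rw [pv_mem_hopB, ← pv_bridge grafo hn m x]
  simp

theorem expandir_ids_spec : Claim_equal_expandir_ids := by
  intro ids grafo _ hpre
  unfold Pre_expandir_ids at hpre
  unfold Spec_expandir_ids
  have hA : expandir_ids ids grafo =
      PySem.List.sorted (pvStep grafo (pvStep grafo (PySem.Set.ofList ids))) (fun x => x) := rfl
  have hB : expandir_ids_alt ids grafo =
      PySem.List.sorted (PySem.Set.union (PySem.Set.union (PySem.Set.ofList ids)
        (pvHopB grafo (PySem.Set.ofList ids)))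
        (pvHopB grafo (pvHopB grafo (PySem.Set.ofList ids)))) (fun x => x) := rfl
  rw [hA, hB]
  set S0 := PySem.Set.ofList ids with hS0
  have memAll : ∀ x, x ∈ pvStep grafo (pvStep grafo S0) ↔
      x ∈ PySem.Set.union (PySem.Set.union S0 (pvHopB grafo S0)) (pvHopB grafo (pvHopB grafo S0)) := by
    intro x
    simp only [pv_mem_pvStep, pv_mem_pvHopB grafo hpre, PySem.Set.mem_union]
    constructor
    · rintro (h | ⟨i, (hi | hi), hrest⟩)
      · exact Or.inl h
      · exact Or.inl (Or.inr ⟨i, hi, hrest⟩)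
      · exact Or.inr ⟨i, hi, hrest⟩
    · rintro ((h | h) | ⟨i, hi, hrest⟩)
      · exact Or.inl (Or.inl h)
      · exact Or.inl (Or.inr h)
      · exact Or.inr ⟨i, Or.inr hi, hrest⟩
  have hnodA : (pvStep grafo (pvStep grafo S0)).Nodup :=
    pv_nodup_pvStep _ _ (pv_nodup_pvStep _ _ (PySem.Set.nodup_ofList ids))
  have hnodB : (PySem.Set.union (PySem.Set.union S0 (pvHopB grafo S0))
      (pvHopB grafo (pvHopB grafo S0))).Nodup :=
    PySem.Set.nodup_union _ _ (PySem.Set.nodup_union _ _ (PySem.Set.nodup_ofList ids))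
  exact PySem.List.sorted_eq_sorted_of_perm _ _ _ (fun a b h => h)
    ((List.perm_ext_iff_of_nodup hnodA hnodB).mpr memAll)
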